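-- pv_equiv track=rewrite | github.com/c-abbott/aurora | prompt.py | _resolve_member
-- ===== SOURCE A (Python) =====
-- _STOPWORDS = frozenset({
--     "the", "and", "for", "but", "not", "you", "all", "can", "had", "her",
--     "was", "one", "our", "his", "has", "are", "who", "how", "what", "when",
--     "where", "why", "does", "did", "been", "have", "this", "that", "with",
--     "from", "they", "will", "would", "could", "should", "about", "which",
--     "their", "there", "than", "then", "them", "each", "make", "like",
--     "just", "over", "such", "take", "also", "most", "into", "some",
-- })
--
-- def _resolve_member(question: str, member_names: list[str]) -> str | None:
--     """Best-effort fuzzy match of a member name from the question."""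
--     words = [
--         w.removesuffix("'s").removesuffix("\u2019s").strip(".,!?;:").lower()
--         for w in question.split()
--     ]
--     words = [w for w in words if len(w) >= 3 and w not in _STOPWORDS]
--
--     best, best_score = None, 0
--     for name in member_names:
--         for part in name.lower().split():
--             part = part.strip("-")
--             for w in words:
--                 if w == part:
--                     score = 3
--                 elif len(w) >= 3 and len(part) >= 3 and w[:3] == part[:3]:
--                     score = 2
--                 else:
--                     continue
--                 if score > best_score:
--                     best, best_score = name, score
--     return best if best_score >= 2 else None
-- ===== SOURCE B (Python) =====
-- _STOPWORDS = frozenset({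
--     "the", "and", "for", "but", "not", "you", "all", "can", "had", "her",
--     "was", "one", "our", "his", "has", "are", "who", "how", "what", "when",
--     "where", "why", "does", "did", "been", "have", "this", "that", "with",
--     "from", "they", "will", "would", "could", "should", "about", "which",
--     "their", "there", "than", "then", "them", "each", "make", "like",
--     "just", "over", "such", "take", "also", "most", "into", "some",
-- })
--
--
-- def _words(question):
--     ws = [
--         w.removesuffix("'s").removesuffix("\u2019s").strip(".,!?;:").lower()
--         for w in question.split()
--     ]
--     return [w for w in ws if len(w) >= 3 and w not in _STOPWORDS]
--
--
-- def _resolve_member(question: str, member_names: list[str]) -> str | None: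
--     """First name with an exact word match (score 3); else first name with a
--     3-letter-prefix match (score 2); else None.  Equivalent to the single
--     max-tracking scan because 3 is the maximal score and ties keep the
--     earliest name."""
--     words = _words(question)
--     for name in member_names:
--         for p in name.lower().split():
--             part = p.strip("-")
--             if any(w == part for w in words):
--                 return name
--     for name in member_names:
--         for p in name.lower().split():
--             part = p.strip("-")
--             if any(len(w) >= 3 and len(part) >= 3 and w[:3] == part[:3] for w in words):
--                 return name
--     return None
-- ===== Notes on version B (the rewrite author's own statement) =====
-- stated objective: simpler
-- what changed: Replaces the single max-tracking triple-nested scan over all names with two short-circuiting ordered passes (first exact word match, else first 3-letter-prefix match), which is correct because 3 is the maximal score and ties keep the earliest name.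
import Mathlib
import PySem

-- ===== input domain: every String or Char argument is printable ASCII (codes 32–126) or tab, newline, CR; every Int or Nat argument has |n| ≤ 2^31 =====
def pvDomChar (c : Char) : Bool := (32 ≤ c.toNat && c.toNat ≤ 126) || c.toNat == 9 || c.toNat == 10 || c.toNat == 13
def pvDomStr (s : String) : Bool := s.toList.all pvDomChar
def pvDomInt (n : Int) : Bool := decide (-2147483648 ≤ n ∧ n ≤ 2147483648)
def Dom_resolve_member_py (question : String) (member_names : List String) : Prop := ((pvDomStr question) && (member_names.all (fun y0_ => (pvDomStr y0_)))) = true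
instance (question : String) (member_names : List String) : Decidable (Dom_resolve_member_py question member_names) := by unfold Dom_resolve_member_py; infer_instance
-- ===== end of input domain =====

-- B replaces A's single max-tracking triple-nested scan by two short-circuiting ordered
-- passes (first exact word match, else first 3-letter-prefix match): simpler decomposition,
-- same exact result because 3 is the maximal score and ties keep the earliest name.


-- ===== PORT A =====
-- the _STOPWORDS frozenset, as a list of char lists
def pvStopwords : List (List Char) :=
  ["the", "and", "for", "but", "not", "you", "all", "can", "had", "her",
   "was", "one", "our", "his", "has", "are", "who", "how", "what", "when",
   "where", "why", "does", "did", "been", "have", "this", "that", "with",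
   "from", "they", "will", "would", "could", "should", "about", "which",
   "their", "there", "than", "then", "them", "each", "make", "like",
   "just", "over", "such", "take", "also", "most", "into", "some"].map String.toList

-- s.removesuffix(suf): exact hand port (drop the suffix iff present; suf = [] is a no-op either way)
def pvRemovesuffix (suf cs : List Char) : List Char :=
  if suf.isSuffixOf cs then cs.take (cs.length - suf.length) else cs

-- the word-preprocessing pipeline of A (split, removesuffix x2, strip(".,!?;:"), lower, filter)
def pvWordsA (question : String) : List (List Char) :=
  ((PySem.Chars.split₀ question.toList).map (fun w =>
      PySem.Chars.lower (PySem.Chars.stripChars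
        (pvRemovesuffix "\u2019s".toList (pvRemovesuffix "'s".toList w)) ".,!?;:".toList))).filter
    (fun w => decide (3 ≤ w.length) && !(pvStopwords.contains w))

def resolve_member_py (question : String) (member_names : List String) : Option String :=
  let words := pvWordsA question
  let r := member_names.foldl (fun st name =>
    (PySem.Chars.split₀ (PySem.Chars.lower name.toList)).foldl (fun st part0 =>
      let part := PySem.Chars.stripChars part0 ['-']
      words.foldl (fun st w =>
        if w = part then
          (if (3 : Int) > st.2 then (some name, (3 : Int)) else st)
        else if 3 ≤ w.length ∧ 3 ≤ part.length ∧ w.take 3 = part.take 3 then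
          (if (2 : Int) > st.2 then (some name, (2 : Int)) else st)
        else st) st) st) ((none : Option String), (0 : Int))
  if r.2 ≥ 2 then r.1 else none

-- ===== PORT B =====
-- B keeps the identical word-preprocessing (_words in Source B)
def pvWordsB (question : String) : List (List Char) :=
  ((PySem.Chars.split₀ question.toList).map (fun w =>
      PySem.Chars.lower (PySem.Chars.stripChars
        (pvRemovesuffix "\u2019s".toList (pvRemovesuffix "'s".toList w)) ".,!?;:".toList))).filter
    (fun w => decide (3 ≤ w.length) && !(pvStopwords.contains w))

-- pass-1 predicate: some stripped part of the name equals some word exactly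
def pvExact (words : List (List Char)) (name : String) : Bool :=
  (PySem.Chars.split₀ (PySem.Chars.lower name.toList)).any (fun part0 =>
    let part := PySem.Chars.stripChars part0 ['-']
    words.any (fun w => w == part))

-- pass-2 predicate: some stripped part shares a 3-letter prefix with some word
def pvPref (words : List (List Char)) (name : String) : Bool :=
  (PySem.Chars.split₀ (PySem.Chars.lower name.toList)).any (fun part0 =>
    let part := PySem.Chars.stripChars part0 ['-']
    words.any (fun w => decide (3 ≤ w.length) && decide (3 ≤ part.length) && (w.take 3 == part.take 3)))

def resolve_member_py_alt (question : String) (member_names : List String) : Option String :=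
  let words := pvWordsB question
  match member_names.find? (pvExact words) with
  | some n => some n
  | none => member_names.find? (pvPref words)

-- ===== PRECONDITION & SPEC =====
def Spec_resolve_member_py (question : String) (member_names : List String) (out : Option String) : Prop := out = resolve_member_py_alt question member_names
instance (question : String) (member_names : List String) (out : Option String) : Decidable (Spec_resolve_member_py question member_names out) := by unfold Spec_resolve_member_py; infer_instance

-- ===== CLAIM (what is proved, stated in full; the proofs are below) =====
def Claim_equal_resolve_member_py : Prop := ∀ (question : String) (member_names : List String), Dom_resolve_member_py question member_names → Spec_resolve_member_py question member_names (resolve_member_py question member_names)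

-- ===== LEMMAS AND PROOFS =====

-- A's per-(part,word) "elif" condition: non-exact 3-letter-prefix match
def pvElif (words : List (List Char)) (name : String) : Bool :=
  (PySem.Chars.split₀ (PySem.Chars.lower name.toList)).any (fun part0 =>
    let part := PySem.Chars.stripChars part0 ['-']
    words.any (fun w => !(w == part) && decide (3 ≤ w.length) && decide (3 ≤ part.length) && (w.take 3 == part.take 3)))

-- A's inner word loop for one (name, part), characterised by the two any-predicates
lemma pvWordStep (name : String) (part : List Char) (words : List (List Char)) (st : Option String × Int) :
    words.foldl (fun st w =>
        if w = part then
          (if (3 : Int) > st.2 then (some name, (3 : Int)) else st)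
        else if 3 ≤ w.length ∧ 3 ≤ part.length ∧ w.take 3 = part.take 3 then
          (if (2 : Int) > st.2 then (some name, (2 : Int)) else st)
        else st) st
    = if (words.any (fun w => w == part)) && decide (st.2 < 3) then (some name, 3)
      else if (words.any (fun w => !(w == part) && decide (3 ≤ w.length) && decide (3 ≤ part.length) && (w.take 3 == part.take 3))) && decide (st.2 < 2) then (some name, 2)
      else st := by
  induction words generalizing st with
  | nil => simp
  | cons w ws ih =>
    simp only [List.foldl_cons, List.any_cons]
    by_cases hwp : w = part
    · by_cases h3 : st.2 < 3
      · rw [if_pos hwp, if_pos ((by omega : (3:Int) > st.2)), ih]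
        simp [hwp, h3]
      · rw [if_pos hwp, if_neg ((by omega : ¬ (3:Int) > st.2)), ih]
        have h2 : ¬ st.2 < 2 := by omega
        simp [hwp, h3, h2]
    · rw [if_neg hwp]
      by_cases hpre : 3 ≤ w.length ∧ 3 ≤ part.length ∧ w.take 3 = part.take 3
      · rw [if_pos hpre]
        by_cases h2 : st.2 < 2
        · rw [if_pos ((by omega : (2:Int) > st.2)), ih]
          by_cases hEx : ws.any (fun w => w == part) = true
          · simp [hEx, (by omega : st.2 < 3)]
          · simp only [Bool.not_eq_true] at hEx
            simp [hwp, hpre.1, hpre.2.1, hpre.2.2, hEx, h2]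
        · rw [if_neg ((by omega : ¬ (2:Int) > st.2)), ih]
          simp [hwp, hpre.1, hpre.2.1, hpre.2.2, h2]
      · rw [if_neg hpre, ih]
        have hw : (w == part) = false := by simp [hwp]
        have hb : (decide (3 ≤ w.length) && decide (3 ≤ part.length) && (w.take 3 == part.take 3)) = false := by
          cases hX : (decide (3 ≤ w.length) && decide (3 ≤ part.length) && (w.take 3 == part.take 3)) with
          | false => rfl
          | true =>
            simp only [Bool.and_eq_true, decide_eq_true_eq, beq_iff_eq] at hX
            exact absurd ⟨hX.1.1, hX.1.2, hX.2⟩ hpre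
        simp only [hw, Bool.not_false, Bool.true_and, hb, Bool.false_or]

-- A's inner double fold for one name, characterised by the two per-name predicates
lemma pvNameStep (words : List (List Char)) (name : String) (st : Option String × Int) :
    (PySem.Chars.split₀ (PySem.Chars.lower name.toList)).foldl (fun st part0 =>
      let part := PySem.Chars.stripChars part0 ['-']
      words.foldl (fun st w =>
        if w = part then
          (if (3 : Int) > st.2 then (some name, (3 : Int)) else st)
        else if 3 ≤ w.length ∧ 3 ≤ part.length ∧ w.take 3 = part.take 3 then
          (if (2 : Int) > st.2 then (some name, (2 : Int)) else st)
        else st) st) st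
    = if pvExact words name && decide (st.2 < 3) then (some name, 3)
      else if pvElif words name && decide (st.2 < 2) then (some name, 2)
      else st := by
  unfold pvExact pvElif
  generalize PySem.Chars.split₀ (PySem.Chars.lower name.toList) = parts
  induction parts generalizing st with
  | nil => simp
  | cons p ps ih =>
    simp only [List.foldl_cons, List.any_cons]
    rw [pvWordStep name (PySem.Chars.stripChars p ['-']) words st, ih]
    by_cases hE : (words.any (fun w => w == PySem.Chars.stripChars p ['-'])) = true
    · by_cases h3 : st.2 < 3
      · simp [hE, h3]
      · have h2 : ¬ st.2 < 2 := by omega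
        simp [hE, h3, h2]
    · simp only [Bool.not_eq_true] at hE
      by_cases hP : (words.any (fun w => !(w == PySem.Chars.stripChars p ['-']) && decide (3 ≤ w.length) && decide (3 ≤ (PySem.Chars.stripChars p ['-']).length) && (w.take 3 == (PySem.Chars.stripChars p ['-']).take 3))) = true
      · by_cases h2 : st.2 < 2
        · by_cases hEx : ps.any (fun part0 => words.any (fun w => w == PySem.Chars.stripChars part0 ['-'])) = true
          · simp [hE, hP, h2, hEx, (by omega : st.2 < 3)]
          · simp only [Bool.not_eq_true] at hEx
            simp [hE, hP, h2, hEx]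
        · simp [hE, hP, h2]
      · simp only [Bool.not_eq_true] at hP
        simp [hE, hP]

-- the whole names fold with a general incoming state
lemma pvNamesFoldAux (words : List (List Char)) (l : List String) (st : Option String × Int) :
    l.foldl (fun st name =>
      (PySem.Chars.split₀ (PySem.Chars.lower name.toList)).foldl (fun st part0 =>
        let part := PySem.Chars.stripChars part0 ['-']
        words.foldl (fun st w =>
          if w = part then
            (if (3 : Int) > st.2 then (some name, (3 : Int)) else st)
          else if 3 ≤ w.length ∧ 3 ≤ part.length ∧ w.take 3 = part.take 3 then
            (if (2 : Int) > st.2 then (some name, (2 : Int)) else st)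
          else st) st) st) st
    = if 3 ≤ st.2 then st
      else match l.find? (pvExact words) with
        | some n => (some n, 3)
        | none =>
          if 2 ≤ st.2 then st
          else match l.find? (pvElif words) with
            | some n => (some n, 2)
            | none => st := by
  induction l generalizing st with
  | nil => split_ifs <;> simp
  | cons name rest ih =>
    simp only [List.foldl_cons]
    rw [pvNameStep, ih]
    simp only [Bool.and_eq_true, decide_eq_true_eq]
    by_cases hE : pvExact words name = true
    · by_cases h3 : st.2 < 3
      · rw [if_pos (⟨hE, h3⟩ : pvExact words name = true ∧ st.2 < 3),
            if_pos (show (3:Int) ≤ ((some name, (3:Int)) : Option String × Int).2 by norm_num),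
            if_neg (show ¬ (3:Int) ≤ st.2 by omega), List.find?_cons_of_pos (by simp [hE])]
      · rw [if_neg (show ¬ (pvExact words name = true ∧ st.2 < 3) from fun c => h3 c.2),
            if_neg (show ¬ (pvElif words name = true ∧ st.2 < 2) from fun c => absurd c.2 (by omega)),
            if_pos (show (3:Int) ≤ st.2 by omega), if_pos (show (3:Int) ≤ st.2 by omega)]
    · simp only [Bool.not_eq_true] at hE
      rw [if_neg (by simp [hE] : ¬ (pvExact words name = true ∧ st.2 < 3)),
          List.find?_cons_of_neg (by simp [hE])]
      by_cases hP : pvElif words name = true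
      · by_cases h2 : st.2 < 2
        · rw [if_pos (⟨hP, h2⟩ : pvElif words name = true ∧ st.2 < 2),
              if_neg (show ¬ (3:Int) ≤ ((some name, (2:Int)) : Option String × Int).2 by norm_num),
              if_neg (show ¬ (3:Int) ≤ st.2 by omega)]
          cases List.find? (pvExact words) rest with
          | some n => rfl
          | none =>
            rw [if_pos (show (2:Int) ≤ ((some name, (2:Int)) : Option String × Int).2 by norm_num),
                if_neg (show ¬ (2:Int) ≤ st.2 by omega), List.find?_cons_of_pos (by simp [hP])]
        · rw [if_neg (show ¬ (pvElif words name = true ∧ st.2 < 2) from fun c => absurd c.2 (by omega))]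
          by_cases h3 : (3:Int) ≤ st.2
          · rw [if_pos h3, if_pos h3]
          · rw [if_neg h3, if_neg h3]
            cases List.find? (pvExact words) rest with
            | some n => rfl
            | none =>
              rw [if_pos (show (2:Int) ≤ st.2 by omega), if_pos (show (2:Int) ≤ st.2 by omega)]
      · simp only [Bool.not_eq_true] at hP
        rw [if_neg (by simp [hP] : ¬ (pvElif words name = true ∧ st.2 < 2)),
            List.find?_cons_of_neg (by simp [hP])]

-- the whole names fold from the initial state (None, 0)
lemma pvNamesFold (words : List (List Char)) (l : List String) (st : Option String × Int)
    (hst : st = ((none : Option String), (0 : Int))) :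
    l.foldl (fun st name =>
      (PySem.Chars.split₀ (PySem.Chars.lower name.toList)).foldl (fun st part0 =>
        let part := PySem.Chars.stripChars part0 ['-']
        words.foldl (fun st w =>
          if w = part then
            (if (3 : Int) > st.2 then (some name, (3 : Int)) else st)
          else if 3 ≤ w.length ∧ 3 ≤ part.length ∧ w.take 3 = part.take 3 then
            (if (2 : Int) > st.2 then (some name, (2 : Int)) else st)
          else st) st) st) st
    = match l.find? (pvExact words) with
      | some n => (some n, 3)
      | none => match l.find? (pvElif words) with
        | some n => (some n, 2)
        | none => ((none : Option String), (0 : Int)) := by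
  subst hst
  rw [pvNamesFoldAux]
  norm_num

lemma pvFindCongr {α : Type} (p q : α → Bool) (l : List α) (h : ∀ x ∈ l, p x = q x) :
    l.find? p = l.find? q := by
  induction l with
  | nil => rfl
  | cons x xs ih =>
    simp only [List.find?_cons, h x (by simp)]
    cases hq : q x <;> simp [ih (fun y hy => h y (by simp [hy]))]

-- when no name has an exact match, A's elif predicate coincides with B's prefix predicate
lemma pvAnyCongr {α : Type} (p q : α → Bool) (l : List α) (h : ∀ x ∈ l, p x = q x) :
    l.any p = l.any q := by
  induction l with
  | nil => rfl
  | cons x xs ih =>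
    simp only [List.any_cons, h x (by simp), ih (fun y hy => h y (by simp [hy]))]

-- when no part of the name matches a word exactly, A's elif predicate is B's prefix predicate
lemma pvElif_eq_pref (words : List (List Char)) (name : String)
    (h : pvExact words name = false) : pvElif words name = pvPref words name := by
  unfold pvExact at h
  unfold pvElif pvPref
  simp only [List.any_eq_false, Bool.not_eq_true, beq_iff_eq] at h
  apply pvAnyCongr
  intro part0 hp
  apply pvAnyCongr
  intro w hw
  have hne : (w == PySem.Chars.stripChars part0 ['-']) = false := by
    rw [beq_eq_false_iff_ne]
    exact h part0 hp w hw
  simp [hne]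

-- ===== VERDICT (by name: the statement is the Claim_ definition above) =====
theorem resolve_member_py_spec : Claim_equal_resolve_member_py := by
  intro question member_names _
  unfold Spec_resolve_member_py resolve_member_py resolve_member_py_alt
  have hw : pvWordsB question = pvWordsA question := rfl
  rw [hw]
  set words := pvWordsA question with hwords
  dsimp only
  rw [pvNamesFold words member_names _ rfl]
  cases hE : member_names.find? (pvExact words) with
  | some n => simp
  | none =>
    have hall : ∀ x ∈ member_names, pvExact words x = false := by
      intro x hx
      have := List.find?_eq_none.mp hE x hx
      simpa using this
    rw [pvFindCongr (pvElif words) (pvPref words) member_names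
      (fun x hx => pvElif_eq_pref words x (hall x hx))]
    cases hP : member_names.find? (pvPref words) with
    | some n => simp
    | none => simp
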